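-- pv_equiv track=rewrite | github.com/yrapop01/fable | legacy/tex.py | join_envirs
-- ===== SOURCE A (Python) =====
-- def join_envirs(s):
--     envir = []
--     count = 0
--
--     for c in s:
--         if c[0] == '\\begin':
--             envir.extend(c)
--             count += 1
--             continue
--         if count > 0:
--             envir.extend(c)
--             if c[0] == '\\end':
--                 count -= 1
--                 if count == 0:
--                     yield envir
--                     envir = []
--             continue
--         yield c
-- ===== SOURCE B (Python) =====
-- def join_envirs(s):
--     it = iter(s)
--     for c in it:
--         if c[0] != '\\begin':
--             yield c
--         else:
--             buf = list(c)
--             depth = 1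
--             for t in it:
--                 buf.extend(t)
--                 if t[0] == '\\begin':
--                     depth += 1
--                 elif t[0] == '\\end':
--                     depth -= 1
--                     if depth == 0:
--                         yield buf
--                         break
-- ===== Notes on version B (the rewrite author's own statement) =====
-- stated objective: alternative
-- what changed: B replaces A's single state machine with count/envir flags carried across every iteration by a two-level decomposition: an outer loop yields pass-through tokens and, on '\begin', a dedicated inner loop consumes the shared iterator into a fresh buffer tracking nesting depth until the block closes.
-- outside the precondition, e.g. on join_envirs([[]]): A raises IndexError, B raises IndexError
import Mathlib
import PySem

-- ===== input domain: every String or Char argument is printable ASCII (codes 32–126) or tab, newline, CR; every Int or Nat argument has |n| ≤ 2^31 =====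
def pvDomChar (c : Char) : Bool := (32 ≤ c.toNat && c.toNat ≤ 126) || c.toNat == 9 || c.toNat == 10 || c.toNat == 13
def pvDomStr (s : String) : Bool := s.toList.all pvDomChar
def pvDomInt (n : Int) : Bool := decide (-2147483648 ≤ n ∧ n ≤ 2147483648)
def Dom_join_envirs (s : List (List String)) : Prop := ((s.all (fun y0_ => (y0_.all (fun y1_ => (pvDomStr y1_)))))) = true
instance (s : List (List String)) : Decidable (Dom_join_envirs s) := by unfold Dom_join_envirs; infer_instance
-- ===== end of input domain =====

-- B restructures A's flag-based state machine into an outer pass-through loop with an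
-- inner depth-counting loop that consumes each environment block from the shared iterator.
-- ===== PORT A =====
-- one fold step of A's loop; state = (envir, count, accumulated yields)
def joinStepA (st : List String × Int × List (List String)) (c : List String) :
    List String × Int × List (List String) :=
  let (envir, count, out) := st
  if c.headD "" = "\\begin" then (envir ++ c, count + 1, out)
  else if count > 0 then
    let envir' := envir ++ c
    if c.headD "" = "\\end" then
      if count - 1 = 0 then ([], 0, out ++ [envir'])
      else (envir', count - 1, out)
    else (envir', count, out)
  else (envir, count, out ++ [c])

def join_envirs (s : List (List String)) : List (List String) :=
  (s.foldl joinStepA ([], 0, [])).2.2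

-- ===== PORT B =====
mutual
-- outer loop of B: yield tokens, hand off to the inner loop on '\begin'
def joinOuterB : List (List String) → List (List String)
  | [] => []
  | c :: rest =>
    if c.headD "" ≠ "\\begin" then c :: joinOuterB rest
    else joinInnerB rest c 1
-- inner loop of B: collect one block into buf, tracking nesting depth
def joinInnerB : List (List String) → List String → Int → List (List String)
  | [], _, _ => []
  | t :: rest, buf, depth =>
    let buf' := buf ++ t
    if t.headD "" = "\\begin" then joinInnerB rest buf' (depth + 1)
    else if t.headD "" = "\\end" then
      if depth - 1 = 0 then buf' :: joinOuterB rest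
      else joinInnerB rest buf' (depth - 1)
    else joinInnerB rest buf' depth
end

def join_envirs_alt (s : List (List String)) : List (List String) := joinOuterB s

-- ===== PRECONDITION & SPEC =====
-- Pre_ excludes inputs containing an empty token list, on which Python A raises IndexError at c[0].
def Pre_join_envirs (s : List (List String)) : Prop := ∀ c ∈ s, c ≠ []
instance (s : List (List String)) : Decidable (Pre_join_envirs s) := by unfold Pre_join_envirs; infer_instance
def pvWitness_join_envirs : List (List String) :=
  [["a"], ["\\begin", "x"], ["b"], ["\\end", "x"], ["c"]]
def Spec_join_envirs (s : List (List String)) (out : List (List String)) : Prop := out = join_envirs_alt s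
instance (s : List (List String)) (out : List (List String)) : Decidable (Spec_join_envirs s out) := by unfold Spec_join_envirs; infer_instance

-- ===== CLAIM (what is proved, stated in full; the proofs are below) =====
def Claim_equal_join_envirs : Prop := ∀ (s : List (List String)), Dom_join_envirs s → Pre_join_envirs s → Spec_join_envirs s (join_envirs s)

-- ===== LEMMAS AND PROOFS =====
-- joint invariant: A's fold from any inner state matches joinInnerB, and from the
-- outer state ([], 0) matches joinOuterB, each prefixed by the yields already made
lemma joinAB_key (s : List (List String)) : ∀ (envir : List String) (count : Int) (out : List (List String)),
    ((1 ≤ count → (s.foldl joinStepA (envir, count, out)).2.2 = out ++ joinInnerB s envir count) ∧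
     ((s.foldl joinStepA ([], 0, out)).2.2 = out ++ joinOuterB s)) := by
  induction s with
  | nil => intro envir count out; simp [joinInnerB, joinOuterB]
  | cons c rest ih =>
    intro envir count out
    constructor
    · intro hc
      have hpos : count > 0 := by omega
      rw [List.foldl_cons]
      simp only [joinStepA, joinInnerB]
      by_cases hb : c.headD "" = "\\begin"
      · rw [if_pos hb, if_pos hb]
        exact (ih _ _ _).1 (by omega)
      · rw [if_neg hb, if_pos hpos, if_neg hb]
        by_cases he : c.headD "" = "\\end"
        · rw [if_pos he, if_pos he]
          by_cases h1 : count - 1 = 0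
          · rw [if_pos h1, if_pos h1, (ih [] 0 (out ++ [envir ++ c])).2]
            simp
          · rw [if_neg h1, if_neg h1]
            exact (ih _ _ _).1 (by omega)
        · rw [if_neg he, if_neg he]
          exact (ih _ _ _).1 hc
    · rw [List.foldl_cons]
      simp only [joinStepA, joinOuterB]
      by_cases hb : c.headD "" = "\\begin"
      · rw [if_pos hb, if_neg (not_not_intro hb)]
        exact (ih _ _ _).1 (by omega)
      · rw [if_neg hb, if_neg (by omega : ¬ ((0:Int) > 0)), if_pos hb, (ih [] 0 (out ++ [c])).2]
        simp

-- ===== VERDICT (by name: the statement is the Claim_ definition above) =====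
theorem join_envirs_spec : Claim_equal_join_envirs := by
  intro s _ _
  show join_envirs s = join_envirs_alt s
  unfold join_envirs join_envirs_alt
  simpa using (joinAB_key s [] 0 []).2
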